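-- pv_equiv track=rewrite | github.com/K0lb3/Ouroboros | old/unit_names.py | name_collab
-- ===== SOURCE A (Python) =====
-- def name_collab(iname,loc):
--     iname = iname[6:]
--
--     #collab
--     collabs={
--         'FATE': ['Fate' ,'Fate/Stay Night [UBW]'],
--         'FA'  : ['FA'   ,'Fullmetal Alchemist'],
--         'RH'  : ['RH'   ,'Radiant Historia'],
--         'POK' : ['POTK' ,'Phantom Of The Kill'],
--         'S'   : ['SN'   ,'Shinobi Nightmare'],
--         'FF15': ['FF'   ,'Final Fantasy 15'],
--         'DIS' : ['DIS'  ,'Disgea'],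
--         'SEK' : ['EO'   ,'Etrian Odyssey'],
--         'SQ'  : ['EMD'  ,'Etrian Mystery Dungeon'],
--         'APR' : [''     ,'April Fool'],
--         'CRY' : ['CR'   ,'Crystal Re:Union']
--         }
--
--     collab=""
--     collab_short=''
--     for c in collabs:
--         if c+'_' == iname[:len(c)+1]:
--             collab = collabs[c][1]
--             collab_short = collabs[c][0]
--             iname= iname[len(c)+1:]
--             break
--
--     #unknown name
--     try:
--         name = loc['UN_V2_'+iname]['NAME']
--     except:
--         name = iname.replace('_',' ')
--         prefix={
--             'BLK' : 'Black Killer',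
--             'L'   : 'Little',
--             }
--
--         for p in prefix:
--             if  p+' ' == name[:len(p)+1]:
--                 name = prefix[p] + ' ' + name[len(p)+1:]
--
--         name=name.title()
--
--     return [name,collab,collab_short]
-- ===== SOURCE B (Python) =====
-- def name_collab(iname, loc):
--     COLLABS = {
--         'FATE': ['Fate', 'Fate/Stay Night [UBW]'],
--         'FA':   ['FA',   'Fullmetal Alchemist'],
--         'RH':   ['RH',   'Radiant Historia'],
--         'POK':  ['POTK', 'Phantom Of The Kill'],
--         'S':    ['SN',   'Shinobi Nightmare'],
--         'FF15': ['FF',   'Final Fantasy 15'],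
--         'DIS':  ['DIS',  'Disgea'],
--         'SEK':  ['EO',   'Etrian Odyssey'],
--         'SQ':   ['EMD',  'Etrian Mystery Dungeon'],
--         'APR':  ['',     'April Fool'],
--         'CRY':  ['CR',   'Crystal Re:Union'],
--     }
--     PREFIX = {'BLK': ['Black', 'Killer'], 'L': ['Little']}
--
--     # token pipeline: split once on '_', consume a collab token, and build the
--     # fallback display name word by word instead of string slicing/replacing
--     tokens = iname[6:].split('_')
--     collab = collab_short = ''
--     if len(tokens) > 1 and tokens[0] in COLLABS:
--         collab_short, collab = COLLABS[tokens[0]]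
--         tokens = tokens[1:]
--
--     entry = loc.get('UN_V2_' + '_'.join(tokens), {})
--     if 'NAME' in entry:
--         name = entry['NAME']
--     else:
--         words = [w for t in tokens for w in t.split(' ')]
--         if len(words) > 1 and words[0] in PREFIX:
--             words = PREFIX[words[0]] + words[1:]
--         name = ' '.join(w.title() for w in words)
--
--     return [name, collab, collab_short]
-- ===== Notes on version B (the rewrite author's own statement) =====
-- stated objective: alternative
-- what changed: B is a token pipeline: it splits iname once on '_' into tokens, consumes a collab token by keyed lookup, joins the remaining tokens for the loc key, and builds the fallback display name word by word (splitting on spaces, swapping the BLK/L head word for its expansion, titling each word and joining), where A repeatedly slices the string against every collab key, uses replace/startswith-style slice tests and titles the whole string.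
import Mathlib
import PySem

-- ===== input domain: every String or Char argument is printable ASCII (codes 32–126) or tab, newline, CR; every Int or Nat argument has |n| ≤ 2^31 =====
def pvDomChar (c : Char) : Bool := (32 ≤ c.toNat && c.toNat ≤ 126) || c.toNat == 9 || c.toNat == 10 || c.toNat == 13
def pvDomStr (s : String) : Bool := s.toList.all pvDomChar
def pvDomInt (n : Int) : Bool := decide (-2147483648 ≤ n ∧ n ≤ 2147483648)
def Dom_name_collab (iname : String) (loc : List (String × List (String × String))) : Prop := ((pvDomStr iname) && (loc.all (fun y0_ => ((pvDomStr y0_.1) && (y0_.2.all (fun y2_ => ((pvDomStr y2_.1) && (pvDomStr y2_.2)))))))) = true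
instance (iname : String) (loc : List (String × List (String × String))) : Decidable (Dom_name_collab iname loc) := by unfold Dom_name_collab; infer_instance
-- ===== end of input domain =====

-- B rebuilds the function as a token pipeline: split once on '_', consume a collab token by
-- keyed lookup, and assemble the fallback display name word by word (per-word title, join)
-- instead of A's prefix-slice scans, string replace and whole-string title (objective: alternative).

-- the collab table (key as a char list, then short name, then full name)
def pvCollabs : List (List Char × String × String) :=
  [("FATE".toList, "Fate", "Fate/Stay Night [UBW]"),
   ("FA".toList,   "FA",   "Fullmetal Alchemist"),
   ("RH".toList,   "RH",   "Radiant Historia"),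
   ("POK".toList,  "POTK", "Phantom Of The Kill"),
   ("S".toList,    "SN",   "Shinobi Nightmare"),
   ("FF15".toList, "FF",   "Final Fantasy 15"),
   ("DIS".toList,  "DIS",  "Disgea"),
   ("SEK".toList,  "EO",   "Etrian Odyssey"),
   ("SQ".toList,   "EMD",  "Etrian Mystery Dungeon"),
   ("APR".toList,  "",     "April Fool"),
   ("CRY".toList,  "CR",   "Crystal Re:Union")]

-- str.title(), ported by hand char-by-char (exact on the ASCII domain: a letter after a
-- non-letter is uppercased, a letter after a letter is lowercased, others unchanged)
def pvTitleGo : List Char → Bool → List Char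
  | [], _ => []
  | c :: rest, prev =>
    (if PySem.Chars.isalpha c then
      (if prev then PySem.Chars.lowerChar c else PySem.Chars.upperChar c)
     else c) :: pvTitleGo rest (PySem.Chars.isalpha c)

-- ===== PORT A =====
-- A's prefix table: key, replacement text
def pvPrefixesA : List (List Char × List Char) :=
  [("BLK".toList, "Black Killer".toList), ("L".toList, "Little".toList)]

-- A's for-loop over the collab keys with break: first key c with c+'_' == iname[:len(c)+1]
def pvScanA : List (List Char × String × String) → List Char → String × String × List Char
  | [], iname => ("", "", iname)
  | (c, sh, fl) :: rest, iname =>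
    if c ++ ['_'] = PySem.List.slice iname none (some ((c.length : Int) + 1)) then
      (fl, sh, PySem.List.slice iname (some ((c.length : Int) + 1)) none)
    else pvScanA rest iname

-- A's except-branch: replace '_' by ' ', the prefix for-loop (no break), then .title()
def pvFallbackA (iname : List Char) : List Char :=
  pvTitleGo (pvPrefixesA.foldl (fun name pr =>
      if pr.1 ++ [' '] = PySem.List.slice name none (some ((pr.1.length : Int) + 1)) then
        pr.2 ++ [' '] ++ PySem.List.slice name (some ((pr.1.length : Int) + 1)) none
      else name) (PySem.Chars.replace iname ['_'] [' '])) false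

def pvBodyA (iname : List Char) (loc : List (String × List (String × String))) : List String :=
  match pvScanA pvCollabs iname with
  | (collab, collab_short, rest) =>
    -- try: loc['UN_V2_'+iname]['NAME']; the bare except catches either missing key
    match (List.lookup (String.ofList ("UN_V2_".toList ++ rest)) loc).bind
            (fun e => List.lookup "NAME" e) with
    | some name => [name, collab, collab_short]
    | none => [String.ofList (pvFallbackA rest), collab, collab_short]

def name_collab (iname : String) (loc : List (String × List (String × String))) : List String :=
  pvBodyA (PySem.List.slice iname.toList (some 6) none) loc

-- ===== PORT B =====
-- B's prefix dict: key word, replacement words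
def pvPrefixB : List (List Char × List (List Char)) :=
  [("BLK".toList, ["Black".toList, "Killer".toList]), ("L".toList, ["Little".toList])]

-- w.title() for a single word (same hand char-by-char port of title, started fresh)
def pvTitleWord (w : List Char) : List Char := pvTitleGo w false

-- if len(tokens) > 1 and tokens[0] in COLLABS: pop the collab token
def pvCollabStep : List (List Char) → String × String × List (List Char)
  | t :: t2 :: ts =>
    (match pvCollabs.find? (fun e => e.1 == t) with
     | some e => (e.2.1, e.2.2, t2 :: ts)
     | none => ("", "", t :: t2 :: ts))
  | tokens => ("", "", tokens)

-- if len(words) > 1 and words[0] in PREFIX: words = PREFIX[words[0]] + words[1:]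
def pvExpand (words : List (List Char)) : List (List Char) :=
  match words with
  | w :: w2 :: ws =>
    (match pvPrefixB.find? (fun e => e.1 == w) with
     | some e => e.2 ++ w2 :: ws
     | none => w :: w2 :: ws)
  | _ => words

def pvBodyB (tokens0 : List (List Char)) (loc : List (String × List (String × String))) : List String :=
  match pvCollabStep tokens0 with
  | (collab_short, collab, tokens) =>
    -- entry = loc.get('UN_V2_' + '_'.join(tokens), {}); if 'NAME' in entry: …
    match List.lookup "NAME"
            ((List.lookup (String.ofList ("UN_V2_".toList ++ PySem.Chars.join ['_'] tokens)) loc).getD []) with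
    | some name => [name, collab, collab_short]
    | none =>
      [String.ofList (PySem.Chars.join [' ']
          ((pvExpand (tokens.flatMap (fun t => PySem.Chars.splitOn t [' ']))).map pvTitleWord)),
       collab, collab_short]

def name_collab_alt (iname : String) (loc : List (String × List (String × String))) : List String :=
  pvBodyB (PySem.Chars.splitOn (PySem.List.slice iname.toList (some 6) none) ['_']) loc

-- ===== PRECONDITION & SPEC =====
def Spec_name_collab (iname : String) (loc : List (String × List (String × String))) (out : List String) : Prop := out = name_collab_alt iname loc
instance (iname : String) (loc : List (String × List (String × String))) (out : List String) : Decidable (Spec_name_collab iname loc out) := by unfold Spec_name_collab; infer_instance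

-- ===== CLAIM (what is proved, stated in full; the proofs are below) =====
def Claim_equal_name_collab : Prop := ∀ (iname : String) (loc : List (String × List (String × String))), Dom_name_collab iname loc → Spec_name_collab iname loc (name_collab iname loc)

-- ===== LEMMAS AND PROOFS =====

-- proof-side model of Python's split on a ONE-character separator
def pvSplit1 (c : Char) : List Char → List (List Char)
  | [] => [[]]
  | x :: xs =>
    if x = c then [] :: pvSplit1 c xs
    else
      match pvSplit1 c xs with
      | [] => [[x]]
      | t :: ts => (x :: t) :: ts

theorem pvSplit1_ne_nil (c : Char) (l : List Char) : pvSplit1 c l ≠ [] := by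
  cases l with
  | nil => simp [pvSplit1]
  | cons x xs =>
    simp only [pvSplit1]
    split_ifs
    · simp
    · cases pvSplit1 c xs <;> simp

theorem splitOn_go_spec (c : Char) (l cur : List Char) (acc : List (List Char)) (fuel : Nat)
    (h : l.length < fuel) :
    PySem.Chars.splitOn.go [c] fuel l cur acc
      = acc.reverse ++ (match pvSplit1 c l with
                        | [] => []
                        | t :: ts => (cur.reverse ++ t) :: ts) := by
  induction l generalizing fuel cur acc with
  | nil =>
    cases fuel with
    | zero => simp at h
    | succ f =>
      rw [PySem.Chars.splitOn.go.eq_def]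
      simp [pvSplit1]
  | cons x xs ih =>
    cases fuel with
    | zero => simp at h
    | succ f =>
      have hf : xs.length < f := by simpa using h
      rw [PySem.Chars.splitOn.go.eq_def]
      by_cases hx : x = c
      · have hg : List.isPrefixOf [c] (x :: xs) = true := by
          simp [List.isPrefixOf, hx]
        simp only [hg, if_true]
        rw [show List.drop [c].length (x :: xs) = xs by simp]
        rw [ih _ _ _ hf]
        simp only [pvSplit1, if_pos hx]
        cases hps : pvSplit1 c xs with
        | nil => exact absurd hps (pvSplit1_ne_nil c xs)
        | cons t ts => simp
      · have hg : List.isPrefixOf [c] (x :: xs) = false := by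
          simp [List.isPrefixOf]
          exact fun hc => absurd hc.symm hx
        simp only [hg]
        rw [if_neg (by simp)]
        rw [ih _ _ _ hf]
        simp only [pvSplit1, if_neg hx]
        cases hps : pvSplit1 c xs with
        | nil => exact absurd hps (pvSplit1_ne_nil c xs)
        | cons t ts => simp


theorem splitOn_single (c : Char) (l : List Char) :
    PySem.Chars.splitOn l [c] = pvSplit1 c l := by
  have h := splitOn_go_spec c l [] [] (l.length + 1) (by omega)
  rw [show PySem.Chars.splitOn l [c] = PySem.Chars.splitOn.go [c] (l.length + 1) l [] [] from rfl]
  rw [h]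
  cases hps : pvSplit1 c l with
  | nil => exact absurd hps (pvSplit1_ne_nil c l)
  | cons t ts => simp


theorem replace_single (c d : Char) (l : List Char) :
    PySem.Chars.replace l [c] [d] = l.map (fun x => if x = c then d else x) := by
  have go_spec : ∀ (xs acc : List Char) (fuel : Nat), xs.length ≤ fuel →
      PySem.Chars.replace.go [c] [d] fuel xs acc
        = acc.reverse ++ xs.map (fun x => if x = c then d else x) := by
    intro xs
    induction xs with
    | nil =>
      intro acc fuel _
      cases fuel <;> rw [PySem.Chars.replace.go.eq_def] <;> simp
    | cons x xs ih =>
      intro acc fuel hf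
      cases fuel with
      | zero => simp at hf
      | succ f =>
        rw [PySem.Chars.replace.go.eq_def]
        by_cases hx : x = c
        · have hg : List.isPrefixOf [c] (x :: xs) = true := by
            simp [List.isPrefixOf, hx]
          simp only [hg, if_true]
          rw [show List.drop [c].length (x :: xs) = xs by simp]
          rw [ih _ _ (by simpa using hf)]
          simp [hx]
        · have hg : List.isPrefixOf [c] (x :: xs) = false := by
            simp [List.isPrefixOf]
            exact fun hc => absurd hc.symm hx
          simp only [hg]
          rw [if_neg (by simp)]
          rw [ih _ _ (by simpa using hf)]
          simp [hx]
  rw [show PySem.Chars.replace l [c] [d] = PySem.Chars.replace.go [c] [d] l.length l [] from by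
    rw [PySem.Chars.replace]; simp]
  simpa using go_spec l [] l.length le_rfl


theorem join_pvSplit1 (c : Char) (l : List Char) :
    PySem.Chars.join [c] (pvSplit1 c l) = l := by
  induction l with
  | nil => simp [pvSplit1, PySem.Chars.join_singleton]
  | cons x xs ih =>
    by_cases hx : x = c
    · simp only [pvSplit1, if_pos hx]
      cases hps : pvSplit1 c xs with
      | nil => exact absurd hps (pvSplit1_ne_nil c xs)
      | cons t ts =>
        rw [PySem.Chars.join_cons_cons]
        rw [hps] at ih
        simp [ih, hx]
    · simp only [pvSplit1, if_neg hx]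
      cases hps : pvSplit1 c xs with
      | nil => exact absurd hps (pvSplit1_ne_nil c xs)
      | cons t ts =>
        rw [hps] at ih
        cases ts with
        | nil =>
          rw [PySem.Chars.join_singleton] at ih ⊢
          simp [ih]
        | cons u us =>
          rw [PySem.Chars.join_cons_cons] at ih ⊢
          simp at ih ⊢
          simp [ih]


theorem pvSplit1_of_not_mem (c : Char) (l : List Char) (h : c ∉ l) :
    pvSplit1 c l = [l] := by
  induction l with
  | nil => rfl
  | cons x xs ih =>
    simp at h
    simp [pvSplit1, Ne.symm h.1 , ih h.2]


theorem pvSplit1_append_sep (c : Char) (x y : List Char) :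
    pvSplit1 c (x ++ c :: y) = pvSplit1 c x ++ pvSplit1 c y := by
  induction x with
  | nil => simp [pvSplit1]
  | cons z x' ih =>
    by_cases hz : z = c
    · simp [pvSplit1, hz, ih]
    · simp only [List.cons_append, pvSplit1, if_neg hz, ih]
      cases hps : pvSplit1 c x' with
      | nil => exact absurd hps (pvSplit1_ne_nil c x')
      | cons t ts => simp


theorem not_mem_of_mem_pvSplit1 (c : Char) (l : List Char) :
    ∀ t ∈ pvSplit1 c l, c ∉ t := by
  induction l with
  | nil =>
    intro t h
    simp [pvSplit1] at h
    simp [h]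
  | cons x xs ih =>
    intro t h
    by_cases hx : x = c
    · simp only [pvSplit1, if_pos hx] at h
      rcases List.mem_cons.mp h with h | h
      · simp [h]
      · exact ih t h
    · simp only [pvSplit1, if_neg hx] at h
      cases hps : pvSplit1 c xs with
      | nil => exact absurd hps (pvSplit1_ne_nil c xs)
      | cons u us =>
        rw [hps] at h
        rcases List.mem_cons.mp h with h | h
        · subst h
          intro hm
          rcases List.mem_cons.mp hm with h | h
          · exact hx h.symm
          · exact ih u (by simp [hps]) h
        · exact ih t (by rw [hps]; exact List.mem_cons_of_mem _ h)


theorem pvSplit1_join (c : Char) (ws : List (List Char)) (hne : ws ≠ [])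
    (hw : ∀ w ∈ ws, c ∉ w) :
    pvSplit1 c (PySem.Chars.join [c] ws) = ws := by
  induction ws with
  | nil => exact absurd rfl hne
  | cons w ws ih =>
    cases ws with
    | nil =>
      rw [PySem.Chars.join_singleton]
      exact pvSplit1_of_not_mem c w (hw w (by simp))
    | cons w2 ws' =>
      rw [PySem.Chars.join_cons_cons]
      rw [show w ++ [c] ++ PySem.Chars.join [c] (w2 :: ws') = w ++ c :: PySem.Chars.join [c] (w2 :: ws') by simp]
      rw [pvSplit1_append_sep]
      rw [pvSplit1_of_not_mem c w (hw w (by simp))]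
      rw [ih (by simp) (fun v hv => hw v (List.mem_cons_of_mem _ hv))]
      simp


-- A's comparison  p ++ [q] == m[:len(p)+1]  is just a prefix test
theorem pv_cond_iff (p : List Char) (q : Char) (m : List Char) :
    (p ++ [q] = PySem.List.slice m none (some ((p.length : Int) + 1))) ↔ (p ++ [q]) <+: m := by
  have h1 : ((p.length : Int) + 1) = (((p.length + 1 : Nat)) : Int) := by push_cast; ring
  rw [h1, PySem.List.slice_to _ (by positivity)]
  rw [List.prefix_iff_eq_take]
  have h2 : (p ++ [q]).length = p.length + 1 := by simp
  rw [h2]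
  simp


theorem pv_slice_drop (m : List Char) (n : Nat) :
    PySem.List.slice m (some ((n : Int) + 1)) none = m.drop (n + 1) := by
  have h1 : ((n : Int) + 1) = (((n + 1 : Nat)) : Int) := by push_cast; ring
  rw [h1, PySem.List.slice_from _ (by positivity)]
  simp


theorem prefix_sep_iff (c : Char) (p t r : List Char) (hp : c ∉ p) (ht : c ∉ t) :
    (p ++ [c]) <+: (t ++ c :: r) ↔ p = t := by
  induction p generalizing t with
  | nil =>
    cases t with
    | nil => simp
    | cons a t' =>
      simp only [List.nil_append]
      constructor
      · rintro ⟨u, hu⟩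
        simp only [List.cons_append] at hu
        exact absurd (List.cons.inj hu).1.symm (by simp at ht; exact fun hh => ht.1 hh.symm)
      · intro hf
        exact absurd hf (by simp)
  | cons b p' ih =>
    cases t with
    | nil =>
      constructor
      · rintro ⟨u, hu⟩
        simp only [List.cons_append] at hu
        exact absurd (List.cons.inj hu).1 (by simp at hp; exact fun hh => hp.1 hh.symm)
      · intro hf
        exact absurd hf (by simp)
    | cons a t' =>
      rw [show (b :: p') ++ [c] = b :: (p' ++ [c]) by simp]
      rw [show (a :: t') ++ c :: r = a :: (t' ++ c :: r) by simp]
      rw [List.cons_prefix_cons]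
      rw [ih t' (fun hh => hp (List.mem_cons_of_mem _ hh)) (fun hh => ht (List.mem_cons_of_mem _ hh))]
      simp


theorem prefix_sep_free (c : Char) (p t : List Char) (ht : c ∉ t) :
    ¬ (p ++ [c]) <+: t := by
  intro h
  exact ht (h.sublist.subset (by simp))


theorem scan_nosep (L : List (List Char × String × String)) (s : List Char) (hs : '_' ∉ s) :
    pvScanA L s = ("", "", s) := by
  induction L with
  | nil => rfl
  | cons e L ih =>
    obtain ⟨c, sh, fl⟩ := e
    simp only [pvScanA]
    rw [if_neg]
    · exact ih
    · intro hc
      exact hs (((pv_cond_iff c '_' s).mp hc).sublist.subset (by simp))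


theorem scan_eq (L : List (List Char × String × String)) (hk : ∀ e ∈ L, '_' ∉ e.1)
    (t r : List Char) (ht : '_' ∉ t) :
    pvScanA L (t ++ '_' :: r)
      = (match L.find? (fun e => e.1 == t) with
         | some e => (e.2.2, e.2.1, r)
         | none => ("", "", t ++ '_' :: r)) := by
  induction L with
  | nil => simp [pvScanA, List.find?]
  | cons e L ih =>
    obtain ⟨c, sh, fl⟩ := e
    have hc : '_' ∉ c := hk (c, sh, fl) (by simp)
    have hcond : (c ++ ['_'] = PySem.List.slice (t ++ '_' :: r) none (some ((c.length : Int) + 1)))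
        ↔ c = t := (pv_cond_iff c '_' (t ++ '_' :: r)).trans (prefix_sep_iff '_' c t r hc ht)
    by_cases hct : c = t
    · simp only [pvScanA]
      rw [if_pos (hcond.mpr hct)]
      have hdrop : PySem.List.slice (t ++ '_' :: r) (some ((c.length : Int) + 1)) none = r := by
        rw [pv_slice_drop]
        subst hct
        rw [show c ++ '_' :: r = (c ++ ['_']) ++ r by simp]
        rw [show c.length + 1 = (c ++ ['_']).length by simp]
        exact List.drop_left
      rw [hdrop]
      have hfind : ((c, sh, fl) :: L).find? (fun e => e.1 == t) = some (c, sh, fl) := by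
        simp [List.find?, hct]
      rw [hfind]
    · simp only [pvScanA]
      rw [if_neg (fun h => hct (hcond.mp h))]
      rw [ih (fun e he => hk e (List.mem_cons_of_mem _ he))]
      have hfind : ((c, sh, fl) :: L).find? (fun e => e.1 == t) = L.find? (fun e => e.1 == t) := by
        simp [List.find?, beq_eq_false_iff_ne.mpr hct]
      rw [hfind]


theorem pvCollabs_keys : ∀ e ∈ pvCollabs, '_' ∉ e.1 := by decide

theorem main_scan (s : List Char) :
    ∃ collab short r, pvScanA pvCollabs s = (collab, short, r)
      ∧ pvCollabStep (pvSplit1 '_' s) = (short, collab, pvSplit1 '_' r) := by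
  cases hps : pvSplit1 '_' s with
  | nil => exact absurd hps (pvSplit1_ne_nil _ _)
  | cons t ts =>
    cases ts with
    | nil =>
      have hs : s = t := by
        have hj := join_pvSplit1 '_' s
        rw [hps, PySem.Chars.join_singleton] at hj
        exact hj.symm
      have ht : '_' ∉ s := by
        rw [hs]
        exact not_mem_of_mem_pvSplit1 '_' s t (by rw [hps]; simp)
      refine ⟨"", "", s, scan_nosep _ _ ht, ?_⟩
      rw [hps]
      rfl
    | cons t2 ts' =>
      have ht : '_' ∉ t := not_mem_of_mem_pvSplit1 '_' s t (by rw [hps]; simp)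
      have hmem : ∀ w ∈ t2 :: ts', '_' ∉ w := fun w hw =>
        not_mem_of_mem_pvSplit1 '_' s w (by rw [hps]; exact List.mem_cons_of_mem _ hw)
      have hs : s = t ++ '_' :: PySem.Chars.join ['_'] (t2 :: ts') := by
        have hj := join_pvSplit1 '_' s
        rw [hps, PySem.Chars.join_cons_cons] at hj
        rw [← hj]; simp
      cases hfind : pvCollabs.find? (fun e => e.1 == t) with
      | some e =>
        refine ⟨e.2.2, e.2.1, PySem.Chars.join ['_'] (t2 :: ts'), ?_, ?_⟩
        · rw [hs, scan_eq pvCollabs pvCollabs_keys t _ ht, hfind]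
        · simp only [pvCollabStep, hfind]
          rw [pvSplit1_join '_' (t2 :: ts') (by simp) hmem]
      | none =>
        refine ⟨"", "", s, ?_, ?_⟩
        · rw [hs, scan_eq pvCollabs pvCollabs_keys t _ ht, hfind]
        · simp only [pvCollabStep, hfind]
          rw [hps]


theorem titleGo_append (a b : List Char) (p : Bool) :
    pvTitleGo (a ++ b) p
      = pvTitleGo a p ++ pvTitleGo b (a.foldl (fun _ c => PySem.Chars.isalpha c) p) := by
  induction a generalizing p with
  | nil => simp [pvTitleGo]
  | cons x a ih => simp [pvTitleGo, ih]


theorem title_join (W : List (List Char)) :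
    pvTitleGo (PySem.Chars.join [' '] W) false = PySem.Chars.join [' '] (W.map pvTitleWord) := by
  induction W with
  | nil => simp [PySem.Chars.join_nil, pvTitleGo]
  | cons w W ih =>
    cases W with
    | nil => simp [PySem.Chars.join_singleton, pvTitleWord]
    | cons w2 ws =>
      rw [PySem.Chars.join_cons_cons]
      rw [show w ++ [' '] ++ PySem.Chars.join [' '] (w2 :: ws)
            = w ++ (' ' :: PySem.Chars.join [' '] (w2 :: ws)) by simp]
      rw [titleGo_append]
      have hsp : pvTitleGo (' ' :: PySem.Chars.join [' '] (w2 :: ws))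
            (List.foldl (fun _ c => PySem.Chars.isalpha c) false w)
          = ' ' :: pvTitleGo (PySem.Chars.join [' '] (w2 :: ws)) false := by
        simp [pvTitleGo, show PySem.Chars.isalpha ' ' = false from by decide]
      rw [hsp, ih]
      rw [show List.map pvTitleWord (w :: w2 :: ws)
            = pvTitleWord w :: pvTitleWord w2 :: List.map pvTitleWord ws from rfl]
      rw [PySem.Chars.join_cons_cons]
      simp [pvTitleWord]


theorem split_map_sub (l : List Char) :
    pvSplit1 ' ' (l.map (fun x => if x = '_' then ' ' else x))
      = (pvSplit1 '_' l).flatMap (pvSplit1 ' ') := by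
  have hmapw : ∀ w : List Char, '_' ∉ w →
      w.map (fun x => if x = '_' then ' ' else x) = w := by
    intro w hw
    induction w with
    | nil => rfl
    | cons a w ih =>
      simp only [List.mem_cons, not_or] at hw
      rw [List.map_cons, if_neg (fun he => hw.1 he.symm), ih hw.2]
  have key : ∀ ws : List (List Char), (∀ w ∈ ws, '_' ∉ w) → ws ≠ [] →
      pvSplit1 ' ' ((PySem.Chars.join ['_'] ws).map (fun x => if x = '_' then ' ' else x))
        = ws.flatMap (fun t => pvSplit1 ' ' t) := by
    intro ws
    induction ws with
    | nil => intro _ h; exact absurd rfl h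
    | cons w ws ih =>
      intro hw _
      cases ws with
      | nil =>
        rw [PySem.Chars.join_singleton, hmapw w (hw w (by simp))]
        simp
      | cons w2 ws' =>
        rw [PySem.Chars.join_cons_cons]
        rw [show w ++ ['_'] ++ PySem.Chars.join ['_'] (w2 :: ws')
              = w ++ '_' :: PySem.Chars.join ['_'] (w2 :: ws') by simp]
        rw [List.map_append, hmapw w (hw w (by simp))]
        rw [show ('_' :: PySem.Chars.join ['_'] (w2 :: ws')).map (fun x => if x = '_' then ' ' else x)
              = ' ' :: (PySem.Chars.join ['_'] (w2 :: ws')).map (fun x => if x = '_' then ' ' else x) by simp]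
        rw [pvSplit1_append_sep]
        rw [ih (fun v hv => hw v (List.mem_cons_of_mem _ hv)) (by simp)]
        simp
  have hj := join_pvSplit1 '_' l
  conv_lhs => rw [← hj]
  rw [key _ (not_mem_of_mem_pvSplit1 '_' l) (pvSplit1_ne_nil _ _)]


theorem fold_expand (W : List (List Char)) (hW : ∀ w ∈ W, ' ' ∉ w) (hne : W ≠ []) :
    pvPrefixesA.foldl (fun name pr =>
        if pr.1 ++ [' '] = PySem.List.slice name none (some ((pr.1.length : Int) + 1)) then
          pr.2 ++ [' '] ++ PySem.List.slice name (some ((pr.1.length : Int) + 1)) none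
        else name) (PySem.Chars.join [' '] W)
      = PySem.Chars.join [' '] (pvExpand W) := by
  cases W with
  | nil => exact absurd rfl hne
  | cons w ws =>
    have hw : ' ' ∉ w := hW w (by simp)
    cases ws with
    | nil =>
      rw [PySem.Chars.join_singleton]
      simp only [pvPrefixesA, List.foldl]
      rw [if_neg (fun h => prefix_sep_free ' ' _ w hw ((pv_cond_iff _ ' ' w).mp h))]
      rw [if_neg (fun h => prefix_sep_free ' ' _ w hw ((pv_cond_iff _ ' ' w).mp h))]
      rw [show pvExpand [w] = [w] from rfl, PySem.Chars.join_singleton]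
    | cons w2 ws' =>
      have hJ : PySem.Chars.join [' '] (w :: w2 :: ws')
          = w ++ ' ' :: PySem.Chars.join [' '] (w2 :: ws') := by
        rw [PySem.Chars.join_cons_cons]; simp
      rw [hJ]
      set J := PySem.Chars.join [' '] (w2 :: ws') with hJd
      simp only [pvPrefixesA, List.foldl]
      by_cases hb : w = "BLK".toList
      · subst hb
        have hc1 : "BLK".toList ++ [' '] = PySem.List.slice ("BLK".toList ++ ' ' :: J) none (some ((("BLK".toList : List Char).length : Int) + 1)) := by
          rw [pv_cond_iff]
          exact (prefix_sep_iff ' ' _ _ _ (by decide) hw).mpr rfl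
        rw [if_pos hc1]
        have hdrop : PySem.List.slice ("BLK".toList ++ ' ' :: J) (some ((("BLK".toList : List Char).length : Int) + 1)) none = J := by
          rw [pv_slice_drop]
          rw [show "BLK".toList ++ ' ' :: J = ("BLK".toList ++ [' ']) ++ J by simp]
          rw [show ("BLK".toList : List Char).length + 1 = (("BLK".toList ++ [' ']) : List Char).length by simp]
          exact List.drop_left
        rw [hdrop]
        have hc2 : ¬ ("L".toList ++ [' '] = PySem.List.slice ("Black Killer".toList ++ [' '] ++ J) none (some ((("L".toList : List Char).length : Int) + 1))) := by
          rw [pv_cond_iff]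
          rw [show "Black Killer".toList ++ [' '] ++ J = "Black".toList ++ ' ' :: ("Killer".toList ++ ' ' :: J) from by
            rw [show "Black Killer".toList = "Black".toList ++ ' ' :: "Killer".toList from by decide]
            simp]
          rw [prefix_sep_iff ' ' _ _ _ (by decide) (by decide)]
          decide
        rw [if_neg hc2]
        rw [show pvExpand ("BLK".toList :: w2 :: ws') = "Black".toList :: "Killer".toList :: w2 :: ws' from rfl]
        rw [PySem.Chars.join_cons_cons, PySem.Chars.join_cons_cons, ← hJd]
        rw [show "Black Killer".toList = "Black".toList ++ ' ' :: "Killer".toList from by decide]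
        simp
      · by_cases hl : w = "L".toList
        · subst hl
          have hc1 : ¬ ("BLK".toList ++ [' '] = PySem.List.slice ("L".toList ++ ' ' :: J) none (some ((("BLK".toList : List Char).length : Int) + 1))) := by
            rw [pv_cond_iff]
            rw [prefix_sep_iff ' ' _ _ _ (by decide) hw]
            decide
          rw [if_neg hc1]
          have hc2 : "L".toList ++ [' '] = PySem.List.slice ("L".toList ++ ' ' :: J) none (some ((("L".toList : List Char).length : Int) + 1)) := by
            rw [pv_cond_iff]
            exact (prefix_sep_iff ' ' _ _ _ (by decide) hw).mpr rfl
          rw [if_pos hc2]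
          have hdrop : PySem.List.slice ("L".toList ++ ' ' :: J) (some ((("L".toList : List Char).length : Int) + 1)) none = J := by
            rw [pv_slice_drop]
            rw [show "L".toList ++ ' ' :: J = ("L".toList ++ [' ']) ++ J by simp]
            rw [show ("L".toList : List Char).length + 1 = (("L".toList ++ [' ']) : List Char).length by simp]
            exact List.drop_left
          rw [hdrop]
          rw [show pvExpand ("L".toList :: w2 :: ws') = "Little".toList :: w2 :: ws' from rfl]
          rw [PySem.Chars.join_cons_cons, ← hJd]
        · have hc1 : ¬ ("BLK".toList ++ [' '] = PySem.List.slice (w ++ ' ' :: J) none (some ((("BLK".toList : List Char).length : Int) + 1))) := by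
            rw [pv_cond_iff]
            rw [prefix_sep_iff ' ' _ _ _ (by decide) hw]
            exact fun h => hb h.symm
          rw [if_neg hc1]
          have hc2 : ¬ ("L".toList ++ [' '] = PySem.List.slice (w ++ ' ' :: J) none (some ((("L".toList : List Char).length : Int) + 1))) := by
            rw [pv_cond_iff]
            rw [prefix_sep_iff ' ' _ _ _ (by decide) hw]
            exact fun h => hl h.symm
          rw [if_neg hc2]
          have hexp : pvExpand (w :: w2 :: ws') = w :: w2 :: ws' := by
            simp only [pvExpand, pvPrefixB, List.find?]
            rw [show (("BLK".toList : List Char) == w) = false from beq_eq_false_iff_ne.mpr (fun h => hb h.symm)]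
            rw [show (("L".toList : List Char) == w) = false from beq_eq_false_iff_ne.mpr (fun h => hl h.symm)]
          rw [hexp, PySem.Chars.join_cons_cons, ← hJd]
          simp

theorem fallback_eq (r : List Char) :
    pvFallbackA r
      = PySem.Chars.join [' ']
          ((pvExpand ((pvSplit1 '_' r).flatMap (fun t => pvSplit1 ' ' t))).map pvTitleWord) := by
  unfold pvFallbackA
  rw [replace_single]
  have hW := join_pvSplit1 ' ' (r.map (fun x => if x = '_' then ' ' else x))
  conv_lhs => rw [← hW]
  rw [fold_expand _ (not_mem_of_mem_pvSplit1 ' ' _) (pvSplit1_ne_nil _ _)]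
  rw [title_join]
  rw [split_map_sub]


theorem body_eq (s : List Char) (loc : List (String × List (String × String))) :
    pvBodyA s loc = pvBodyB (PySem.Chars.splitOn s ['_']) loc := by
  obtain ⟨collab, short, r, hA, hB⟩ := main_scan s
  unfold pvBodyA pvBodyB
  rw [hA, splitOn_single, hB]
  dsimp only
  rw [join_pvSplit1 '_' r]
  have hlk : (List.lookup (String.ofList ("UN_V2_".toList ++ r)) loc).bind (fun e => List.lookup "NAME" e)
      = List.lookup "NAME" ((List.lookup (String.ofList ("UN_V2_".toList ++ r)) loc).getD []) := by
    cases List.lookup (String.ofList ("UN_V2_".toList ++ r)) loc <;> simp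
  rw [hlk]
  cases List.lookup "NAME" ((List.lookup (String.ofList ("UN_V2_".toList ++ r)) loc).getD []) with
  | some n => rfl
  | none =>
    simp only [splitOn_single]
    rw [fallback_eq]


-- ===== VERDICT =====
theorem name_collab_spec : Claim_equal_name_collab := by
  intro iname loc _
  unfold Spec_name_collab name_collab name_collab_alt
  exact body_eq _ loc
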